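-- pv_equiv track=rewrite | github.com/elvezjp/spec-code-ai-mapper | md2map/md2map/parsers/markdown_parser.py | _split_paragraphs
-- ===== SOURCE A (Python) =====
-- from typing import TYPE_CHECKING, Dict, List, Optional, Tuple
--
-- def _split_paragraphs(
--     lines: List[str], start_line: int, end_line: int
-- ) -> List[Tuple[int, int]]:
--     """段落単位で分割して (start_line, end_line) の配列を返す"""
--     paragraphs: List[Tuple[int, int]] = []
--     i = start_line
--
--     while i <= end_line:
--         if not lines[i - 1].strip():
--             i += 1
--             continue
--         para_start = i
--         while i <= end_line and lines[i - 1].strip():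
--             i += 1
--         para_end = i - 1
--         paragraphs.append((para_start, para_end))
--
--     return paragraphs
-- ===== SOURCE B (Python) =====
-- from typing import List, Tuple
--
-- def _split_paragraphs(
--     lines: List[str], start_line: int, end_line: int
-- ) -> List[Tuple[int, int]]:
--     """Single flat pass: track the open paragraph start, flush on blank lines."""
--     paragraphs: List[Tuple[int, int]] = []
--     para_start = None
--     for i in range(start_line, end_line + 1):
--         if lines[i - 1].strip():
--             if para_start is None:
--                 para_start = i
--         elif para_start is not None:
--             paragraphs.append((para_start, i - 1))
--             para_start = None
--     if para_start is not None:
--         paragraphs.append((para_start, end_line))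
--     return paragraphs
-- ===== Notes on version B (the rewrite author's own statement) =====
-- stated objective: simpler
-- what changed: Replaces A's nested while loops (outer skip over blanks, inner run over non-blanks) by one flat for-loop state machine with an optional open-paragraph start that is flushed at blank lines and at the end.
import Mathlib
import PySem

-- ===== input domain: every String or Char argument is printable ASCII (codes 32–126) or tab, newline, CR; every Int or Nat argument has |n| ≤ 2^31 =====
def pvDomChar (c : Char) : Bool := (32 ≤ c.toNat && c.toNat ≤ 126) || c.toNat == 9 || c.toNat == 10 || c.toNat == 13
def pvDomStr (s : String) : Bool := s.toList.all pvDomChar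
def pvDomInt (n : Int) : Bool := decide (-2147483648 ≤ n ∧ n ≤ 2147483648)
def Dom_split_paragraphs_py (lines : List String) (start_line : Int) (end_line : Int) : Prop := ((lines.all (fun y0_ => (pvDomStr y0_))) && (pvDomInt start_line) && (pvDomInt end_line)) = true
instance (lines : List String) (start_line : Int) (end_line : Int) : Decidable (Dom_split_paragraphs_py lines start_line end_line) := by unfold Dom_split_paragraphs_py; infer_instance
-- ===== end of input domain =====

-- B replaces A's nested while loops by one flat pass with an optional open-paragraph start (objective: simpler).

-- ===== PORT A =====
-- blank test `not lines[i - 1].strip()` (missing index defaults to "", unreachable inside Pre_)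
def pvBlankA (lines : List String) (i : Int) : Bool :=
  PySem.Str.strip ((PySem.List.pyGet? lines (i - 1)).getD "") == ""

-- inner `while i <= end_line and lines[i - 1].strip(): i += 1`, returning the final i
-- (the Nat argument is fuel, a totality guard only; the entry point supplies enough)
def pvInnerA (lines : List String) (e : Int) : Nat → Int → Int
  | 0, i => i
  | Nat.succ n, i =>
    if i ≤ e ∧ pvBlankA lines i = false then pvInnerA lines e n (i + 1) else i

-- outer `while i <= end_line: …` (fuel-guarded the same way)
def pvOuterA (lines : List String) (e : Int) : Nat → Int → List (Int × Int) → List (Int × Int)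
  | 0, _, acc => acc
  | Nat.succ n, i, acc =>
    if i ≤ e then
      if pvBlankA lines i = true then pvOuterA lines e n (i + 1) acc
      else
        let j := pvInnerA lines e n i
        pvOuterA lines e n j (acc ++ [(i, j - 1)])
    else acc

def split_paragraphs_py (lines : List String) (start_line : Int) (end_line : Int) : List (Int × Int) :=
  pvOuterA lines end_line ((end_line + 1 - start_line).toNat + 1) start_line []

-- ===== PORT B =====
-- blank test for B's `lines[i - 1].strip()` (same default for a missing index)
def pvBlankB (lines : List String) (i : Int) : Bool :=
  PySem.Str.strip ((PySem.List.pyGet? lines (i - 1)).getD "") == ""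

-- `for i in range(start_line, end_line + 1)` with state (para_start, paragraphs); final flush after the loop
def pvLoopB (lines : List String) (e : Int) : Nat → Int → Option Int → List (Int × Int) → List (Int × Int)
  | 0, _, _, acc => acc
  | Nat.succ n, i, ps, acc =>
    if i ≤ e then
      if pvBlankB lines i = false then
        match ps with
        | none => pvLoopB lines e n (i + 1) (some i) acc
        | some p => pvLoopB lines e n (i + 1) (some p) acc
      else
        match ps with
        | some p => pvLoopB lines e n (i + 1) none (acc ++ [(p, i - 1)])
        | none => pvLoopB lines e n (i + 1) none acc
    else
      match ps with
      | some p => acc ++ [(p, e)]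
      | none => acc

def split_paragraphs_py_alt (lines : List String) (start_line : Int) (end_line : Int) : List (Int × Int) :=
  pvLoopB lines end_line ((end_line + 1 - start_line).toNat + 1) start_line none []

-- ===== PRECONDITION & SPEC =====
-- Pre_ excludes exactly the inputs where Python A raises IndexError: some i in
-- [start_line, end_line] accesses lines[i-1] outside [-len, len).
def Pre_split_paragraphs_py (lines : List String) (start_line : Int) (end_line : Int) : Prop :=
  end_line < start_line ∨ (1 - (lines.length : Int) ≤ start_line ∧ end_line ≤ (lines.length : Int))
instance (lines : List String) (start_line : Int) (end_line : Int) : Decidable (Pre_split_paragraphs_py lines start_line end_line) := by unfold Pre_split_paragraphs_py; infer_instance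

def pvWitness_split_paragraphs_py : List String × Int × Int := (["a", "", "b c"], 1, 3)

def Spec_split_paragraphs_py (lines : List String) (start_line : Int) (end_line : Int) (out : List (Int × Int)) : Prop := out = split_paragraphs_py_alt lines start_line end_line
instance (lines : List String) (start_line : Int) (end_line : Int) (out : List (Int × Int)) : Decidable (Spec_split_paragraphs_py lines start_line end_line out) := by unfold Spec_split_paragraphs_py; infer_instance

-- ===== CLAIM (what is proved, stated in full; the proofs are below) =====
def Claim_equal_split_paragraphs_py : Prop := ∀ (lines : List String) (start_line : Int) (end_line : Int), Dom_split_paragraphs_py lines start_line end_line → Pre_split_paragraphs_py lines start_line end_line → Spec_split_paragraphs_py lines start_line end_line (split_paragraphs_py lines start_line end_line)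

-- ===== LEMMAS AND PROOFS =====

theorem pvInnerA_ge (lines : List String) (e : Int) (n : Nat) :
    ∀ i : Int, i ≤ pvInnerA lines e n i := by
  induction n with
  | zero => intro i; simp [pvInnerA]
  | succ k ih =>
    intro i
    rw [pvInnerA]
    split
    · have := ih (i + 1); omega
    · omega

theorem pvInnerA_fuel (lines : List String) (e : Int) (n : Nat) :
    ∀ (m : Nat) (i : Int), (e + 1 - i).toNat ≤ n → (e + 1 - i).toNat ≤ m →
      pvInnerA lines e n i = pvInnerA lines e m i := by
  induction n with
  | zero =>
    intro m i h1 _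
    cases m with
    | zero => rfl
    | succ l =>
      simp only [pvInnerA]
      rw [if_neg (fun hc => absurd hc.1 (by omega))]
  | succ k ih =>
    intro m i h1 h2
    cases m with
    | zero =>
      simp only [pvInnerA]
      rw [if_neg (fun hc => absurd hc.1 (by omega))]
    | succ l =>
      simp only [pvInnerA]
      by_cases hc : i ≤ e ∧ pvBlankA lines i = false
      · rw [if_pos hc, if_pos hc]
        exact ih l (i + 1) (by omega) (by omega)
      · rw [if_neg hc, if_neg hc]

theorem pvLoopB_fuel (lines : List String) (e : Int) (n : Nat) :
    ∀ (m : Nat) (i : Int) (ps : Option Int) (acc : List (Int × Int)),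
      (e + 1 - i).toNat < n → (e + 1 - i).toNat < m →
      pvLoopB lines e n i ps acc = pvLoopB lines e m i ps acc := by
  induction n with
  | zero => intro m i ps acc h1 _; omega
  | succ k ih =>
    intro m i ps acc h1 h2
    cases m with
    | zero => omega
    | succ l =>
      simp only [pvLoopB]
      by_cases h : i ≤ e
      · rw [if_pos h, if_pos h]
        by_cases hb : pvBlankB lines i = false
        · rw [if_pos hb, if_pos hb]
          cases ps <;> exact ih l (i + 1) _ acc (by omega) (by omega)
        · rw [if_neg hb, if_neg hb]
          cases ps <;> exact ih l (i + 1) _ _ (by omega) (by omega)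
      · rw [if_neg h, if_neg h]

-- a run of non-blank lines in A corresponds to carrying `some p` in B until the flush
theorem pvLoopB_some (lines : List String) (e : Int) (n : Nat) :
    ∀ (i p : Int) (acc : List (Int × Int)), (e + 1 - i).toNat < n → i ≤ e + 1 →
      pvLoopB lines e n i (some p) acc
        = pvLoopB lines e n (pvInnerA lines e n i) none (acc ++ [(p, pvInnerA lines e n i - 1)]) := by
  induction n with
  | zero => intro i p acc h1 _; omega
  | succ k ih =>
    intro i p acc h1 h2
    by_cases h : i ≤ e
    · by_cases hb : pvBlankA lines i = false
      · have hinner : pvInnerA lines e (k + 1) i = pvInnerA lines e k (i + 1) := by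
          simp only [pvInnerA]; rw [if_pos ⟨h, hb⟩]
        rw [hinner]
        conv_lhs => rw [pvLoopB]
        rw [if_pos h]
        have hb' : pvBlankB lines i = false := hb
        rw [if_pos hb']
        rw [ih (i + 1) p acc (by omega) (by omega)]
        have hge := pvInnerA_ge lines e k (i + 1)
        exact pvLoopB_fuel lines e k (k + 1) _ none _ (by omega) (by omega)
      · have hinner : pvInnerA lines e (k + 1) i = i := by
          simp only [pvInnerA]; rw [if_neg (fun hc => hb hc.2)]
        rw [hinner]
        have hb' : ¬ pvBlankB lines i = false := hb
        conv_lhs => rw [pvLoopB]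
        conv_rhs => rw [pvLoopB]
        simp only [if_pos h, if_neg hb']
    · have hinner : pvInnerA lines e (k + 1) i = i := by
        simp only [pvInnerA]; rw [if_neg (fun hc => h hc.1)]
      rw [hinner]
      conv_lhs => rw [pvLoopB]
      conv_rhs => rw [pvLoopB]
      simp only [if_neg h]
      rw [show i - 1 = e by omega]

theorem pvOuterA_eq_pvLoopB (lines : List String) (e : Int) (n : Nat) :
    ∀ (i : Int) (acc : List (Int × Int)), (e + 1 - i).toNat < n →
      pvOuterA lines e n i acc = pvLoopB lines e n i none acc := by
  induction n with
  | zero => intro i acc h1; omega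
  | succ k ih =>
    intro i acc h1
    by_cases h : i ≤ e
    · by_cases hb : pvBlankA lines i = true
      · conv_lhs => rw [pvOuterA]
        rw [if_pos h, if_pos hb]
        have hb' : ¬ pvBlankB lines i = false := by
          intro hc; exact absurd (hc.symm.trans hb) (by decide)
        conv_rhs => rw [pvLoopB]
        rw [if_pos h, if_neg hb']
        exact ih (i + 1) acc (by omega)
      -- non-blank: A consumes the whole run via pvInnerA; B does the same step by step (pvLoopB_some)
      · have hb0 : pvBlankA lines i = false := by simpa using hb
        conv_lhs => rw [pvOuterA]
        rw [if_pos h, if_neg hb]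
        show pvOuterA lines e k (pvInnerA lines e k i) (acc ++ [(i, pvInnerA lines e k i - 1)])
              = pvLoopB lines e (k + 1) i none acc
        have hf : pvInnerA lines e k i = pvInnerA lines e (k + 1) i :=
          pvInnerA_fuel lines e k (k + 1) i (by omega) (by omega)
        have hstep : pvInnerA lines e (k + 1) i = pvInnerA lines e k (i + 1) := by
          simp only [pvInnerA]; rw [if_pos ⟨h, hb0⟩]
        rw [hf, hstep]
        conv_rhs => rw [pvLoopB]
        rw [if_pos h, if_pos (show pvBlankB lines i = false from hb0)]
        rw [pvLoopB_some lines e k (i + 1) i acc (by omega) (by omega)]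
        have hge := pvInnerA_ge lines e k (i + 1)
        exact ih _ _ (by omega)
    · conv_lhs => rw [pvOuterA]
      conv_rhs => rw [pvLoopB]
      simp only [if_neg h]

-- ===== VERDICT (by name: the statement is the Claim_ definition above) =====
theorem split_paragraphs_py_spec : Claim_equal_split_paragraphs_py := by
  intro lines s e _ _
  unfold Spec_split_paragraphs_py split_paragraphs_py split_paragraphs_py_alt
  exact pvOuterA_eq_pvLoopB lines e _ s [] (by omega)
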